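-- pv_equiv track=rewrite | github.com/ManuelVR03/SGE_Python | Examen/VerdejoManuel/VerdejoManuel.py | correcto
-- ===== SOURCE A (Python) =====
-- def correcto(user):
--     numeros = list(range(0,10))
--     for i in numeros:
--         if str(i) in user:
--             return ""
--     if " " in user:
--         return ""
--     return user
-- ===== SOURCE B (Python) =====
-- def correcto(user):
--     forbidden = set("0123456789 ")
--     return user if forbidden.isdisjoint(user) else ""
-- ===== Notes on version B (the rewrite author's own statement) =====
-- stated objective: simpler
-- what changed: Builds the forbidden-character set once and returns user iff it is disjoint from the string's characters (set.isdisjoint), replacing A's ten whole-string substring scans plus a separate space scan with early returns.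
import Mathlib
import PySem

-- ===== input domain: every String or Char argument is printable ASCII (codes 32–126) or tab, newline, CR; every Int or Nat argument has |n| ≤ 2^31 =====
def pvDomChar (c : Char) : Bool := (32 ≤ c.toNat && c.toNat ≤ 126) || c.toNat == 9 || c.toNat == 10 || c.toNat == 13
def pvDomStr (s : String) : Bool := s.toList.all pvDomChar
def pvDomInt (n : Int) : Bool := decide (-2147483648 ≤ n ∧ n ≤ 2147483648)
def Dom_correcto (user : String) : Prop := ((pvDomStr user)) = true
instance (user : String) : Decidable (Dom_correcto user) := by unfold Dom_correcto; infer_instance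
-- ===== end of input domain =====

-- B builds the forbidden-character set once and tests set-disjointness with the
-- string, replacing A's ten substring scans plus a space scan (objective: simpler).


-- ===== PORT A =====
-- 'for i in numeros: if str(i) in user: return ""' then the space check and 'return user'
def correctoLoopA (user : String) : List Int → String
  | [] => if PySem.Str.isIn " " user then "" else user
  | i :: rest =>
      if PySem.Str.isIn (PySem.Int.toStr i) user then ""
      else correctoLoopA user rest

def correcto (user : String) : String :=
  correctoLoopA user (PySem.List.pyRange 0 10 1)

-- ===== PORT B =====
-- forbidden = set("0123456789 "); return user if forbidden.isdisjoint(user) else ""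
def correcto_alt (user : String) : String :=
  let forbidden : PySem.Set Char := PySem.Set.ofList "0123456789 ".toList
  if PySem.Set.isdisjoint forbidden user.toList then user else ""

-- ===== PRECONDITION & SPEC =====
def Spec_correcto (user : String) (out : String) : Prop := out = correcto_alt user
instance (user : String) (out : String) : Decidable (Spec_correcto user out) := by unfold Spec_correcto; infer_instance

-- ===== CLAIM =====
def Claim_equal_correcto : Prop := ∀ (user : String), Dom_correcto user → Spec_correcto user (correcto user)

-- ===== LEMMAS AND PROOFS =====

-- single-character substring containment = character membership
theorem isIn_singleton (c : Char) (l : List Char) :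
    PySem.Chars.isIn [c] l = l.contains c := by
  cases hb : PySem.Chars.isIn [c] l with
  | false =>
      have h := (PySem.Chars.isIn_eq_false_iff [c] l).mp hb
      rw [List.singleton_infix_iff] at h
      simp [h]
  | true =>
      have h := (PySem.Chars.isIn_iff_infix [c] l).mp hb
      rw [List.singleton_infix_iff] at h
      simp [h]

theorem loopA_eq (user : String) (l : List Int) :
    correctoLoopA user l =
      if l.any (fun i => PySem.Str.isIn (PySem.Int.toStr i) user) then ""
      else if PySem.Str.isIn " " user then "" else user := by
  induction l with
  | nil => rw [List.any_nil]; rfl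
  | cons i rest ih =>
      show (if PySem.Str.isIn (PySem.Int.toStr i) user then ""
            else correctoLoopA user rest) = _
      cases h : PySem.Str.isIn (PySem.Int.toStr i) user with
      | true => rw [if_pos rfl, List.any_cons, h, Bool.true_or, if_pos rfl]
      | false => rw [if_neg (by simp), List.any_cons, h, Bool.false_or, ih]

-- A's combined exit condition ↔ the string contains some forbidden character
theorem condA_iff (user : String) :
    (((PySem.List.pyRange 0 10 1).any
        (fun i => PySem.Str.isIn (PySem.Int.toStr i) user))
      || PySem.Str.isIn " " user) = true
    ↔ ∃ c ∈ "0123456789 ".toList, c ∈ user.toList := by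
  have key : ∀ (i : Int) (d : Char), (PySem.Int.toStr i).toList = [d] →
      PySem.Str.isIn (PySem.Int.toStr i) user = user.toList.contains d := by
    intro i d h
    rw [PySem.Str.isIn_eq, h, isIn_singleton]
  have hr : PySem.List.pyRange 0 10 1 = [0,1,2,3,4,5,6,7,8,9] := by decide
  have hsp : PySem.Str.isIn " " user = user.toList.contains ' ' := by
    rw [PySem.Str.isIn_eq, show (" " : String).toList = [' '] by decide, isIn_singleton]
  have hcs : ("0123456789 ").toList = ['0','1','2','3','4','5','6','7','8','9',' '] := by decide
  rw [hr, hsp, hcs]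
  simp only [List.any_cons, List.any_nil,
    key 0 '0' (by decide), key 1 '1' (by decide), key 2 '2' (by decide),
    key 3 '3' (by decide), key 4 '4' (by decide), key 5 '5' (by decide),
    key 6 '6' (by decide), key 7 '7' (by decide), key 8 '8' (by decide),
    key 9 '9' (by decide)]
  simp [or_assoc]

-- B's disjointness test ↔ no forbidden character occurs in the string
theorem condB_iff (user : String) :
    PySem.Set.isdisjoint (PySem.Set.ofList "0123456789 ".toList) user.toList = true
    ↔ ¬ ∃ c ∈ "0123456789 ".toList, c ∈ user.toList := by
  rw [PySem.Set.isdisjoint_iff]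
  constructor
  · rintro h ⟨c, hc, hcu⟩
    exact h c ((PySem.Set.mem_ofList _ _).mpr hc) hcu
  · intro h c hc hcu
    exact h ⟨c, (PySem.Set.mem_ofList _ _).mp hc, hcu⟩

-- ===== VERDICT =====
theorem correcto_spec : Claim_equal_correcto := by
  intro user _
  unfold Spec_correcto correcto correcto_alt
  rw [loopA_eq]
  by_cases hx : ∃ c ∈ "0123456789 ".toList, c ∈ user.toList
  · have hA := (condA_iff user).mpr hx
    have hB : PySem.Set.isdisjoint (PySem.Set.ofList "0123456789 ".toList) user.toList = false := by
      rw [Bool.eq_false_iff, Ne, condB_iff]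
      exact not_not_intro hx
    rcases Bool.or_eq_true_iff.mp hA with h | h
    · simp only [h, hB]
      simp
    · cases hX : ((PySem.List.pyRange 0 10 1).any
          (fun i => PySem.Str.isIn (PySem.Int.toStr i) user)) <;>
        · simp only [hX, h, hB]
          simp
  · have hB : PySem.Set.isdisjoint (PySem.Set.ofList "0123456789 ".toList) user.toList = true :=
      (condB_iff user).mpr hx
    have hA : (((PySem.List.pyRange 0 10 1).any
        (fun i => PySem.Str.isIn (PySem.Int.toStr i) user))
      || PySem.Str.isIn " " user) = false := by
      rw [Bool.eq_false_iff, Ne, condA_iff]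
      exact hx
    rcases Bool.or_eq_false_iff.mp hA with ⟨h1, h2⟩
    simp only [h1, h2, hB]
    simp
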